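-- pv_equiv track=rewrite | github.com/ngoduythinh250601/Codelearn | All/Trio_of_primes/Trio_of_primes.py | trio_of_primes
-- ===== SOURCE A (Python) =====
-- def prime(m):
--     mark = [True] * (m + 1)
--     mark[0] = mark[1] = False
--     p = []
--     for i in range(2, m + 1):
--         if mark[i]:
--             j = i * i
--             while j <= m:
--                 mark[j] = False
--                 j += i
--             p.append(i)
--     return p, mark, len(p)
--
-- def trio_of_primes(n):
--     p, mark, s = prime(n)
--     ans = []
--     for i in range(s):
--         pi = p[i]
--         for j in range(i, s):
--             pj = p[j]
--             if pi + pj + pj > n: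
--                 break
--             if mark[n - pi - pj]:
--                 ans.append([pi, pj, n - pi - pj])
--     if ans == []:
--         ans.append([-1])
--     return ans
-- ===== SOURCE B (Python) =====
-- def prime(m):
--     mark = [True] * (m + 1)
--     mark[0] = mark[1] = False
--     p = []
--     for i in range(2, m + 1):
--         if mark[i]:
--             j = i * i
--             while j <= m:
--                 mark[j] = False
--                 j += i
--             p.append(i)
--     return p, mark, len(p)
--
-- def trio_of_primes(n):
--     p, _, s = prime(n)
--     ans = []
--     for i in range(s):
--         pi = p[i]
--         rv = n - pi
--         lo, hi = i, s - 1
--         while lo <= hi: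
--             t = p[lo] + p[hi]
--             if t == rv:
--                 ans.append([pi, p[lo], p[hi]])
--                 lo += 1
--                 hi -= 1
--             elif t < rv:
--                 lo += 1
--             else:
--                 hi -= 1
--     if not ans:
--         ans.append([-1])
--     return ans
-- ===== Notes on version B (the rewrite author's own statement) =====
-- stated objective: alternative
-- what changed: The inner scan over candidate middle primes with a sieve-array primality lookup is replaced by a two-pointer meet-in-the-middle walk over the sorted prime list finding pairs summing to n - pi; the sieve is kept unchanged.
-- outside the precondition, e.g. on trio_of_primes(0): A raises IndexError, B raises IndexError
import Mathlib
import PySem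

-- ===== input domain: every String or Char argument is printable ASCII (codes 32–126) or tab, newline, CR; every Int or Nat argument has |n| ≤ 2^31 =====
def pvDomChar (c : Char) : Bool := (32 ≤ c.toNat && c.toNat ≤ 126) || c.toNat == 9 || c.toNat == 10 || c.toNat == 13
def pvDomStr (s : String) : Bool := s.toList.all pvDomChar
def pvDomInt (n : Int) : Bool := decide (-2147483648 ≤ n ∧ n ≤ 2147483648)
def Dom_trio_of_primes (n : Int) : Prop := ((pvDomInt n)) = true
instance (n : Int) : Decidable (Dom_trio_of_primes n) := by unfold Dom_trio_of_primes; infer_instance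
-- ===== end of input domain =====

-- B replaces A's inner scan (break + mark lookup) by a two-pointer walk over the sorted prime
-- list finding pairs summing to n - pi; same sieve, alternative pair-search algorithm.
-- Python lists indexed/updated by int are represented by Array (O(1) get/set, as in Python);
-- all indices reaching `.toNat` are nonnegative on every execution path.
-- ===== PORT A =====
-- shared helper: the sieve `prime(m)` (identical helper in Source A and Source B)
def pvMarkLoop (m i j : Int) (mark : Array Bool) : Array Bool :=
  if _h : 0 < i ∧ j ≤ m then pvMarkLoop m i (j + i) (mark.setIfInBounds j.toNat false) else mark
termination_by (m + 1 - j).toNat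
decreasing_by omega

def pvSieveStep (m : Int) (st : Array Bool × Array Int) (i : Int) : Array Bool × Array Int :=
  if st.1.getD i.toNat false then (pvMarkLoop m i (i * i) st.1, st.2.push i) else st

def pvInit (m : Int) : Array Bool × Array Int :=
  (((Array.replicate (m + 1).toNat true).setIfInBounds 0 false).setIfInBounds 1 false, #[])

def pvPrime (m : Int) : Array Int × Array Bool × Int :=
  let st := (PySem.List.pyRange 2 (m + 1) 1).foldl (pvSieveStep m) (pvInit m)
  (st.2, st.1, (st.2.size : Int))

-- A's inner `for j in range(i, s)` with its break
def pvALoop (n : Int) (p : Array Int) (mark : Array Bool) (s pi j : Int) : List (List Int) :=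
  if _h : j < s then
    let pj := p.getD j.toNat 0
    if pi + pj + pj > n then []
    else
      (if mark.getD (n - pi - pj).toNat false then [[pi, pj, n - pi - pj]] else []) ++
        pvALoop n p mark s pi (j + 1)
  else []
termination_by (s - j).toNat
decreasing_by omega

def pvAOuter (n : Int) (p : Array Int) (mark : Array Bool) (s i : Int) : List (List Int) :=
  if _h : i < s then
    pvALoop n p mark s (p.getD i.toNat 0) i ++ pvAOuter n p mark s (i + 1)
  else []
termination_by (s - i).toNat
decreasing_by omega

def trio_of_primes (n : Int) : List (List Int) :=
  let r := pvPrime n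
  let ans := pvAOuter n r.1 r.2.1 r.2.2 0
  if ans = [] then [[-1]] else ans

-- ===== PORT B =====
-- B's inner `while lo <= hi` two-pointer walk
def pvBTwoPtr (p : Array Int) (pi rv lo hi : Int) : List (List Int) :=
  if _h : lo ≤ hi then
    let a := p.getD lo.toNat 0
    let b := p.getD hi.toNat 0
    if a + b = rv then [pi, a, b] :: pvBTwoPtr p pi rv (lo + 1) (hi - 1)
    else if a + b < rv then pvBTwoPtr p pi rv (lo + 1) hi
    else pvBTwoPtr p pi rv lo (hi - 1)
  else []
termination_by (hi + 1 - lo).toNat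
decreasing_by all_goals omega

def pvBOuter (n : Int) (p : Array Int) (s i : Int) : List (List Int) :=
  if _h : i < s then
    (let pi := p.getD i.toNat 0
     pvBTwoPtr p pi (n - pi) i (s - 1)) ++ pvBOuter n p s (i + 1)
  else []
termination_by (s - i).toNat
decreasing_by omega

def trio_of_primes_alt (n : Int) : List (List Int) :=
  let r := pvPrime n
  let ans := pvBOuter n r.1 r.2.2 0
  if ans = [] then [[-1]] else ans

-- ===== PRECONDITION & SPEC =====
-- Pre_ excludes n ≤ 0, where the Python A raises IndexError (mark[1] on a list of length ≤ 1).
def Pre_trio_of_primes (n : Int) : Prop := 1 ≤ n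
instance (n : Int) : Decidable (Pre_trio_of_primes n) := by unfold Pre_trio_of_primes; infer_instance

def pvWitness_trio_of_primes : Int := (10)

def Spec_trio_of_primes (n : Int) (out : List (List Int)) : Prop := out = trio_of_primes_alt n
instance (n : Int) (out : List (List Int)) : Decidable (Spec_trio_of_primes n out) := by unfold Spec_trio_of_primes; infer_instance

-- ===== CLAIM (what is proved, stated in full; the proofs are below) =====
def Claim_equal_trio_of_primes : Prop := ∀ (n : Int), Dom_trio_of_primes n → Pre_trio_of_primes n → Spec_trio_of_primes n (trio_of_primes n)

-- ===== LEMMAS AND PROOFS =====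

-- reference form of the per-pi inner result: scan l upward, keep l when 2*p[l] ≤ rv and rv - p[l] is prime
def pvRef (p : Array Int) (s pi rv l : Int) : List (List Int) :=
  if _h : l < s then
    (if 2 * p.getD l.toNat 0 ≤ rv ∧ (rv - p.getD l.toNat 0) ∈ p.toList then
        [[pi, p.getD l.toNat 0, rv - p.getD l.toNat 0]]
      else []) ++ pvRef p s pi rv (l + 1)
  else []
termination_by (s - l).toNat
decreasing_by omega

-- invariant of the sieve fold after having processed 2, …, b-1
def pvInv (m b : Int) (st : Array Bool × Array Int) : Prop :=
  st.1.size = (m + 1).toNat ∧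
  List.Pairwise (· < ·) st.2.toList ∧
  (∀ x ∈ st.2.toList, 2 ≤ x ∧ x < b) ∧
  (∀ x : Int, 2 ≤ x → x < b → x ≤ m → (st.1.getD x.toNat false = true ↔ x ∈ st.2.toList))

theorem pvAGetD {α : Type} (a : Array α) (i : Nat) (d : α) : a.getD i d = a[i]?.getD d := by
  unfold Array.getD
  split
  · rename_i h
    rw [Array.getElem?_eq_getElem h]
    rfl
  · rename_i h
    rw [Array.getElem?_eq_none (by omega)]
    rfl

theorem pvMarkLoop_size (m i j : Int) (mark : Array Bool) :
    (pvMarkLoop m i j mark).size = mark.size := by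
  fun_induction pvMarkLoop with
  | case1 j mark h ih => rw [ih]; simp
  | case2 => rfl

theorem pvMarkLoop_getD (m i j : Int) (mark : Array Bool) (x : Nat) (hx : (x : Int) < j) (d : Bool) :
    (pvMarkLoop m i j mark).getD x d = mark.getD x d := by
  fun_induction pvMarkLoop with
  | case1 j mark h ih =>
      rw [ih (by omega), pvAGetD, pvAGetD, Array.getElem?_setIfInBounds, if_neg (by omega)]
  | case2 => rfl

theorem pvSieveStep_inv (m b : Int) (st : Array Bool × Array Int) (hb : 2 ≤ b) (hbm : b ≤ m)
    (h : pvInv m b st) : pvInv m (b + 1) (pvSieveStep m st b) := by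
  obtain ⟨hlen, hpw, hbnd, hiff⟩ := h
  have hbb : b < b * b := by nlinarith
  unfold pvSieveStep
  by_cases hmk : st.1.getD b.toNat false = true
  · rw [if_pos hmk]
    refine ⟨by rw [pvMarkLoop_size]; exact hlen, ?_, ?_, ?_⟩
    · rw [Array.toList_push, List.pairwise_append]
      exact ⟨hpw, List.pairwise_singleton _ _,
        fun x hx y hy => by simp at hy; subst hy; exact (hbnd x hx).2⟩
    · intro x hx
      rw [Array.toList_push] at hx
      rcases List.mem_append.1 hx with hx | hx
      · have := hbnd x hx; omega
      · simp at hx; omega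
    · intro x h2 hxb hxm
      have hx0 : (0:Int) ≤ x := by omega
      have hunch : (pvMarkLoop m b (b * b) st.1).getD x.toNat false = st.1.getD x.toNat false := by
        apply pvMarkLoop_getD
        omega
      rw [hunch, Array.toList_push]
      by_cases hxb' : x < b
      · rw [hiff x h2 hxb' hxm]
        constructor
        · intro hx; exact List.mem_append.2 (Or.inl hx)
        · intro hx
          rcases List.mem_append.1 hx with hx | hx
          · exact hx
          · simp at hx; omega
      · have hxe : x = b := by omega
        subst hxe
        simp [hmk]
  · rw [if_neg hmk]
    refine ⟨hlen, hpw, fun x hx => by have := hbnd x hx; omega, ?_⟩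
    intro x h2 hxb hxm
    by_cases hxb' : x < b
    · exact hiff x h2 hxb' hxm
    · have hxe : x = b := by omega
      subst hxe
      constructor
      · intro hc; exact absurd hc hmk
      · intro hx; have := hbnd x hx; omega

theorem pvFold_inv (m : Int) (b : Int) (hb2 : 2 ≤ b) (hbm : b ≤ m + 1) :
    pvInv m b ((PySem.List.pyRange 2 b 1).foldl (pvSieveStep m) (pvInit m)) := by
  induction b, hb2 using Int.le_induction with
  | base =>
      have he : PySem.List.pyRange 2 2 1 = ([] : List Int) := by simp [pysem]
      rw [he]
      refine ⟨by simp [pvInit], by simp [pvInit], by simp [pvInit], ?_⟩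
      intro x h2 hxb _
      omega
  | succ b hb ih =>
      rw [PySem.List.pyRange_one_succ_right (by omega : (2:Int) ≤ b), List.foldl_append]
      exact pvSieveStep_inv m b _ hb (by omega) (ih (by omega))

theorem pvRef_nil (p : Array Int) (s pi rv l : Int)
    (h : ∀ l', l ≤ l' → l' < s →
      ¬ (2 * p.getD l'.toNat 0 ≤ rv ∧ (rv - p.getD l'.toNat 0) ∈ p.toList)) :
    pvRef p s pi rv l = [] := by
  rw [pvRef]
  split
  · rename_i hls
    rw [if_neg (h l le_rfl hls), pvRef_nil p s pi rv (l+1) (fun l' h1 h2 => h l' (by omega) h2)]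
    rfl
  · rfl
termination_by (s - l).toNat
decreasing_by omega

theorem pvALoop_eq_ref (n : Int) (p : Array Int) (mark : Array Bool) (s pi j : Int)
    (hsorted : ∀ l r : Int, 0 ≤ l → l < r → r < s →
      p.getD l.toNat 0 < p.getD r.toNat 0)
    (hget : ∀ l : Int, 0 ≤ l → l < s → p.getD l.toNat 0 ∈ p.toList)
    (helem : ∀ x ∈ p.toList, 2 ≤ x)
    (hmark : ∀ x : Int, 2 ≤ x → x ≤ n → (mark.getD x.toNat false = true ↔ x ∈ p.toList))
    (hpi : 2 ≤ pi) (hj : 0 ≤ j) :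
    pvALoop n p mark s pi j = pvRef p s pi (n - pi) j := by
  by_cases hjs : j < s
  · have hpjm : p.getD j.toNat 0 ∈ p.toList := hget j hj hjs
    have hpj2 : 2 ≤ p.getD j.toNat 0 := helem _ hpjm
    by_cases hbrk : pi + p.getD j.toNat 0 + p.getD j.toNat 0 > n
    · rw [pvALoop]
      simp only [dif_pos hjs, if_pos hbrk]
      symm
      apply pvRef_nil
      intro l' hl1 hl2
      rintro ⟨hle, -⟩
      have hmono : p.getD j.toNat 0 ≤ p.getD l'.toNat 0 := by
        rcases eq_or_lt_of_le hl1 with he | hlt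
        · rw [he]
        · exact le_of_lt (hsorted j l' hj hlt hl2)
      omega
    · have hx2 : 2 ≤ n - pi - p.getD j.toNat 0 := by omega
      have hxn : n - pi - p.getD j.toNat 0 ≤ n := by omega
      have hcond : (mark.getD (n - pi - p.getD j.toNat 0).toNat false = true) ↔
          (2 * p.getD j.toNat 0 ≤ n - pi ∧ (n - pi - p.getD j.toNat 0) ∈ p.toList) := by
        rw [hmark _ hx2 hxn]
        constructor
        · intro hmem; exact ⟨by omega, hmem⟩
        · intro hc; exact hc.2
      rw [pvALoop, pvRef]
      simp only [dif_pos hjs, if_neg hbrk]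
      congr 1
      · by_cases hmk : mark.getD (n - pi - p.getD j.toNat 0).toNat false = true
        · rw [if_pos hmk, if_pos (hcond.1 hmk)]
        · rw [if_neg hmk, if_neg (fun hc => hmk (hcond.2 hc))]
      · exact pvALoop_eq_ref n p mark s pi (j + 1) hsorted hget helem hmark hpi (by omega)
  · rw [pvALoop, pvRef]
    simp only [dif_neg hjs]
termination_by (s - j).toNat
decreasing_by omega

theorem pvBTwoPtr_eq_ref (p : Array Int) (s pi rv lo hi : Int)
    (hsorted : ∀ l r : Int, 0 ≤ l → l < r → r < s →
      p.getD l.toNat 0 < p.getD r.toNat 0)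
    (hget : ∀ l : Int, 0 ≤ l → l < s → p.getD l.toNat 0 ∈ p.toList)
    (hmemx : ∀ x ∈ p.toList, ∃ r : Int, 0 ≤ r ∧ r < s ∧ p.getD r.toNat 0 = x)
    (hlo : 0 ≤ lo) (hhi : hi < s)
    (hyp : ∀ l r : Int, lo ≤ l → l ≤ r → r < s →
      p.getD l.toNat 0 + p.getD r.toNat 0 = rv → r ≤ hi) :
    pvBTwoPtr p pi rv lo hi = pvRef p s pi rv lo := by
  have hPle : ∀ l r : Int, 0 ≤ l → l ≤ r → r < s →
      p.getD l.toNat 0 ≤ p.getD r.toNat 0 := by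
    intro l r h0 hlr hrs
    rcases eq_or_lt_of_le hlr with he | hl
    · rw [he]
    · exact le_of_lt (hsorted _ _ h0 hl hrs)
  by_cases hlh : lo ≤ hi
  · have h0hi : 0 ≤ hi := le_trans hlo hlh
    have hlos : lo < s := lt_of_le_of_lt hlh hhi
    have hab : p.getD lo.toNat 0 ≤ p.getD hi.toNat 0 := hPle lo hi hlo hlh hhi
    rcases lt_trichotomy (p.getD lo.toNat 0 + p.getD hi.toNat 0) rv with hlt | heq | hgt
    · -- sum too small: lo has no partner, advance lo
      have hnc : ¬ (2 * p.getD lo.toNat 0 ≤ rv ∧ (rv - p.getD lo.toNat 0) ∈ p.toList) := by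
        rintro ⟨h1, h2⟩
        obtain ⟨r, hr0, hrs, hre⟩ := hmemx _ h2
        have hlor : lo ≤ r := by
          by_contra h
          rw [not_le] at h
          have := hsorted r lo hr0 h hlos
          omega
        have hrhi : r ≤ hi := hyp lo r le_rfl hlor hrs (by omega)
        have : p.getD r.toNat 0 ≤ p.getD hi.toNat 0 := hPle r hi hr0 hrhi hhi
        omega
      rw [pvBTwoPtr, pvRef]
      simp only [dif_pos hlh, dif_pos hlos, if_neg (by omega :
        ¬ (p.getD lo.toNat 0 + p.getD hi.toNat 0 = rv)), if_pos hlt,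
        if_neg hnc, List.nil_append]
      exact pvBTwoPtr_eq_ref p s pi rv (lo + 1) hi hsorted hget hmemx (by omega) hhi
        (fun l r h1 h2 h3 h4 => hyp l r (by omega) h2 h3 h4)
    · -- match: emit and move both pointers
      have hcond : 2 * p.getD lo.toNat 0 ≤ rv ∧ (rv - p.getD lo.toNat 0) ∈ p.toList := by
        constructor
        · omega
        · have hba : rv - p.getD lo.toNat 0 = p.getD hi.toNat 0 := by omega
          rw [hba]
          exact hget hi h0hi hhi
      rw [pvBTwoPtr, pvRef]
      simp only [dif_pos hlh, dif_pos hlos, if_pos heq, if_pos hcond]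
      have hba : rv - p.getD lo.toNat 0 = p.getD hi.toNat 0 := by omega
      rw [hba, List.singleton_append]
      congr 1
      refine pvBTwoPtr_eq_ref p s pi rv (lo + 1) (hi - 1) hsorted hget hmemx (by omega)
        (by omega) ?_
      intro l r h1 h2 h3 h4
      have hrr : r ≤ hi := hyp l r (by omega) h2 h3 h4
      rcases eq_or_lt_of_le hrr with he | h
      · exfalso
        subst he
        have hpl : p.getD l.toNat 0 = p.getD lo.toNat 0 := by omega
        have : l = lo := by
          by_contra hne
          have hllo : lo < l := by omega
          have := hsorted lo l hlo hllo (by omega)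
          omega
        omega
      · omega
    · -- sum too big: hi has no partner, retreat hi
      rw [pvBTwoPtr]
      simp only [dif_pos hlh, if_neg (by omega :
        ¬ (p.getD lo.toNat 0 + p.getD hi.toNat 0 = rv)),
        if_neg (by omega : ¬ (p.getD lo.toNat 0 + p.getD hi.toNat 0 < rv))]
      refine pvBTwoPtr_eq_ref p s pi rv lo (hi - 1) hsorted hget hmemx hlo (by omega) ?_
      intro l r h1 h2 h3 h4
      have hrr : r ≤ hi := hyp l r h1 h2 h3 h4
      rcases eq_or_lt_of_le hrr with he | h
      · exfalso
        subst he
        have : p.getD lo.toNat 0 ≤ p.getD l.toNat 0 := hPle lo l hlo h1 (by omega)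
        omega
      · omega
  · rw [pvBTwoPtr]
    simp only [dif_neg hlh]
    symm
    apply pvRef_nil
    intro l' h1 h2
    rintro ⟨hc1, hc2⟩
    obtain ⟨r, hr0, hrs, hre⟩ := hmemx _ hc2
    have hl'r : l' ≤ r := by
      by_contra h
      rw [not_le] at h
      have := hsorted r l' hr0 h h2
      omega
    have := hyp l' r h1 hl'r hrs (by omega)
    omega
termination_by (hi + 1 - lo).toNat
decreasing_by all_goals omega

theorem pvOuter_eq (n : Int) (p : Array Int) (mark : Array Bool) (s i : Int)
    (hsorted : ∀ l r : Int, 0 ≤ l → l < r → r < s →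
      p.getD l.toNat 0 < p.getD r.toNat 0)
    (hget : ∀ l : Int, 0 ≤ l → l < s → p.getD l.toNat 0 ∈ p.toList)
    (hmemx : ∀ x ∈ p.toList, ∃ r : Int, 0 ≤ r ∧ r < s ∧ p.getD r.toNat 0 = x)
    (helem : ∀ x ∈ p.toList, 2 ≤ x)
    (hmark : ∀ x : Int, 2 ≤ x → x ≤ n → (mark.getD x.toNat false = true ↔ x ∈ p.toList))
    (hi0 : 0 ≤ i) :
    pvAOuter n p mark s i = pvBOuter n p s i := by
  rw [pvAOuter, pvBOuter]
  by_cases his : i < s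
  · simp only [dif_pos his]
    congr 1
    · rw [pvALoop_eq_ref n p mark s (p.getD i.toNat 0) i hsorted hget helem hmark
        (helem _ (hget i hi0 his)) hi0]
      symm
      exact pvBTwoPtr_eq_ref p s (p.getD i.toNat 0) (n - p.getD i.toNat 0) i (s - 1)
        hsorted hget hmemx hi0 (by omega) (fun l r _ _ h3 _ => by omega)
    · exact pvOuter_eq n p mark s (i + 1) hsorted hget hmemx helem hmark (by omega)
  · simp only [dif_neg his]
termination_by (s - i).toNat
decreasing_by omega

-- ===== VERDICT (by name: the statement is the Claim_ definition above) =====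
theorem trio_of_primes_spec : Claim_equal_trio_of_primes := by
  intro n _hdom hpre
  have hn : (1:Int) ≤ n := hpre
  obtain ⟨hlen, hpw, hbnd, hiff⟩ := pvFold_inv n (n + 1) (by omega) (by omega)
  show trio_of_primes n = trio_of_primes_alt n
  rw [trio_of_primes, trio_of_primes_alt]
  simp only [pvPrime]
  set st := (PySem.List.pyRange 2 (n + 1) 1).foldl (pvSieveStep n) (pvInit n) with hst
  have hgetE : ∀ (l : Int) (_h0 : 0 ≤ l) (hl : l < (st.2.size : Int)),
      st.2.getD l.toNat 0 = st.2.toList[l.toNat]'(by rw [Array.length_toList]; omega) := by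
    intro l h0 hl
    rw [pvAGetD, Array.getElem?_eq_getElem (by omega)]
    simp [Array.getElem_toList]
  have hget : ∀ l : Int, 0 ≤ l → l < (st.2.size : Int) → st.2.getD l.toNat 0 ∈ st.2.toList := by
    intro l h0 hl
    rw [hgetE l h0 hl]
    exact List.getElem_mem _
  have hsorted : ∀ l r : Int, 0 ≤ l → l < r → r < (st.2.size : Int) →
      st.2.getD l.toNat 0 < st.2.getD r.toNat 0 := by
    intro l r h0 hlr hr
    rw [hgetE l h0 (by omega), hgetE r (by omega) hr]
    exact List.pairwise_iff_getElem.1 hpw l.toNat r.toNat (by rw [Array.length_toList]; omega) (by rw [Array.length_toList]; omega)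
      (by omega)
  have hmemx : ∀ x ∈ st.2.toList, ∃ r : Int, 0 ≤ r ∧ r < (st.2.size : Int) ∧
      st.2.getD r.toNat 0 = x := by
    intro x hx
    obtain ⟨k, hk, hke⟩ := List.mem_iff_getElem.1 hx
    have hks : k < st.2.size := by rwa [Array.length_toList] at hk
    refine ⟨(k : Int), by omega, by omega, ?_⟩
    rw [hgetE (k : Int) (by omega) (by omega)]
    simpa using hke
  have helem : ∀ x ∈ st.2.toList, 2 ≤ x := fun x hx => (hbnd x hx).1
  have hmark : ∀ x : Int, 2 ≤ x → x ≤ n →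
      (st.1.getD x.toNat false = true ↔ x ∈ st.2.toList) := by
    intro x h2 hxn
    exact hiff x h2 (by omega) hxn
  rw [pvOuter_eq n st.2 st.1 (st.2.size : Int) 0 hsorted hget hmemx helem hmark le_rfl]
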